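-- pv_equiv track=rewrite | github.com/JoaoGabrielSSilva/ComparadorOrdenacoes | mergeSort.py | pegarListaCores
-- ===== SOURCE A (Python) =====
-- def pegarListaCores(tamanho, esquerda, meio, direita):
--     listaCores = []
--     for i in range(tamanho):
--         if i >= esquerda and i <= direita:
--             if i >= esquerda and i <= meio:
--                 listaCores.append("yellow")  # Marca a parte esquerda a ser mesclada em amarelo
--             else:
--                 listaCores.append("pink")  # Marca a parte direita a ser mesclada em rosa
--         else:
--             listaCores.append("white")  # Mantém o resto em branco
--
--     return listaCores
-- ===== SOURCE B (Python) =====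
-- def pegarListaCores(tamanho, esquerda, meio, direita):
--     n = max(tamanho, 0)
--     lo = max(esquerda, 0)           # first index that can be colored
--     hi = min(direita, n - 1)        # last index that can be colored
--     if lo > hi:
--         return ["white"] * n
--     y = max(0, min(meio, hi) - lo + 1)   # yellow run length
--     p = (hi - lo + 1) - y                # pink run length
--     return ["white"] * lo + ["yellow"] * y + ["pink"] * p + ["white"] * (n - 1 - hi)
-- ===== Notes on version B (the rewrite author's own statement) =====
-- stated objective: alternative
-- what changed: Replaces the per-index three-way branching loop by a closed-form partition: the clamped run lengths (leading white, yellow, pink, trailing white) are computed with max/min arithmetic and the list is built as four homogeneous replicated runs.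
import Mathlib
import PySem

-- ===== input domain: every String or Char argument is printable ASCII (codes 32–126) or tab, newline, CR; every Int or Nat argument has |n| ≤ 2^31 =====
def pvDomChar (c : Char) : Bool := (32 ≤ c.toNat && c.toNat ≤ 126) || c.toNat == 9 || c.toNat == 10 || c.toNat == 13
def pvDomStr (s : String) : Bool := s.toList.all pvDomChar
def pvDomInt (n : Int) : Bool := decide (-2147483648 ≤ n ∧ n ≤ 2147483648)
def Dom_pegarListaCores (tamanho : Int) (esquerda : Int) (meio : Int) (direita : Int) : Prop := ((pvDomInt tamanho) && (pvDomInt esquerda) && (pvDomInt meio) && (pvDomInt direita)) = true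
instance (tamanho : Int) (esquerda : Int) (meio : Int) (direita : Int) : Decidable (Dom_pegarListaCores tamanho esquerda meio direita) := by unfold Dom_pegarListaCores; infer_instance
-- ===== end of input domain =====

-- B builds the result as four homogeneous replicated runs from closed-form clamped
-- run lengths instead of A's per-index three-way branching loop (objective: alternative).

-- ===== PORT A =====
def pegarListaCores (tamanho : Int) (esquerda : Int) (meio : Int) (direita : Int) : List String :=
  (PySem.List.pyRange 0 tamanho 1).foldl
    (fun listaCores i =>
      if esquerda ≤ i ∧ i ≤ direita then
        if esquerda ≤ i ∧ i ≤ meio then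
          listaCores ++ ["yellow"]
        else
          listaCores ++ ["pink"]
      else
        listaCores ++ ["white"]) []

-- ===== PORT B =====
def pegarListaCores_alt (tamanho : Int) (esquerda : Int) (meio : Int) (direita : Int) : List String :=
  let n := max tamanho 0
  let lo := max esquerda 0
  let hi := min direita (n - 1)
  if lo > hi then
    List.replicate n.toNat "white"
  else
    let y := max 0 (min meio hi - lo + 1)
    let p := (hi - lo + 1) - y
    List.replicate lo.toNat "white" ++ List.replicate y.toNat "yellow" ++
      List.replicate p.toNat "pink" ++ List.replicate (n - 1 - hi).toNat "white"

-- ===== PRECONDITION & SPEC =====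
def Spec_pegarListaCores (tamanho : Int) (esquerda : Int) (meio : Int) (direita : Int) (out : List String) : Prop := out = pegarListaCores_alt tamanho esquerda meio direita
instance (tamanho : Int) (esquerda : Int) (meio : Int) (direita : Int) (out : List String) : Decidable (Spec_pegarListaCores tamanho esquerda meio direita out) := by unfold Spec_pegarListaCores; infer_instance

-- ===== CLAIM (what is proved, stated in full; the proofs are below) =====
def Claim_equal_pegarListaCores : Prop := ∀ (tamanho : Int) (esquerda : Int) (meio : Int) (direita : Int), Dom_pegarListaCores tamanho esquerda meio direita → Spec_pegarListaCores tamanho esquerda meio direita (pegarListaCores tamanho esquerda meio direita)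

-- ===== LEMMAS AND PROOFS =====

-- the per-index color A appends
def pvColor (esquerda meio direita : Int) (i : Int) : String :=
  if esquerda ≤ i ∧ i ≤ direita then
    if esquerda ≤ i ∧ i ≤ meio then "yellow" else "pink"
  else "white"

theorem pvFold_eq_map (esquerda meio direita : Int) (l : List Int) (acc : List String) :
    l.foldl
      (fun listaCores i =>
        if esquerda ≤ i ∧ i ≤ direita then
          if esquerda ≤ i ∧ i ≤ meio then
            listaCores ++ ["yellow"]
          else
            listaCores ++ ["pink"]
        else
          listaCores ++ ["white"]) acc = acc ++ l.map (pvColor esquerda meio direita) := by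
  induction l generalizing acc with
  | nil => simp
  | cons x xs ih =>
    simp only [List.foldl_cons, List.map_cons, ih, pvColor]
    split_ifs <;> simp

theorem pvMap_const {f : Int → String} {s : String} (l : List Int)
    (h : ∀ x ∈ l, f x = s) : l.map f = List.replicate l.length s := by
  induction l with
  | nil => simp
  | cons x xs ih =>
    simp only [List.map_cons, List.length_cons, List.replicate_succ]
    rw [h x (by simp), ih fun y hy => h y (by simp [hy])]

-- ===== VERDICT (by name: the statement is the Claim_ definition above) =====
theorem pegarListaCores_spec : Claim_equal_pegarListaCores := by
  intro t e m d _
  show pegarListaCores t e m d = pegarListaCores_alt t e m d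
  unfold pegarListaCores pegarListaCores_alt
  rw [pvFold_eq_map, List.nil_append]
  set n := max t 0 with hn
  set lo := max e 0 with hlo
  set hi := min d (n - 1) with hhi
  have hrange : PySem.List.pyRange 0 t 1 = PySem.List.pyRange 0 n 1 := by
    rcases le_or_gt t 0 with h | h
    · rw [PySem.List.pyRange_one_eq_nil h, PySem.List.pyRange_one_eq_nil (by omega)]
    · have : n = t := by omega
      rw [this]
  rw [hrange]
  by_cases hcase : lo > hi
  · rw [if_pos hcase]
    rw [pvMap_const (s := "white") _ (by
      intro x hx
      rw [PySem.List.mem_pyRange_one] at hx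
      unfold pvColor
      rw [if_neg]; omega),
      PySem.List.length_pyRange_one]
    congr 1; omega
  · rw [if_neg hcase]
    push Not at hcase
    set y := max 0 (min m hi - lo + 1) with hy
    set p := (hi - lo + 1) - y with hp
    have h1 : (0:Int) ≤ lo := by omega
    have h2 : lo ≤ lo + y := by omega
    have h3 : lo + y ≤ hi + 1 := by omega
    have h4 : hi + 1 ≤ n := by omega
    rw [PySem.List.pyRange_one_append 0 lo n h1 (by omega),
        PySem.List.pyRange_one_append lo (lo + y) n h2 (by omega),
        PySem.List.pyRange_one_append (lo + y) (hi + 1) n h3 h4]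
    simp only [List.map_append]
    rw [pvMap_const (s := "white") (PySem.List.pyRange 0 lo 1) (by
        intro x hx; rw [PySem.List.mem_pyRange_one] at hx
        unfold pvColor; rw [if_neg]; omega),
      pvMap_const (s := "yellow") (PySem.List.pyRange lo (lo + y) 1) (by
        intro x hx; rw [PySem.List.mem_pyRange_one] at hx
        unfold pvColor; rw [if_pos (by omega), if_pos (by omega)]),
      pvMap_const (s := "pink") (PySem.List.pyRange (lo + y) (hi + 1) 1) (by
        intro x hx; rw [PySem.List.mem_pyRange_one] at hx
        unfold pvColor; rw [if_pos (by omega), if_neg (by omega)]),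
      pvMap_const (s := "white") (PySem.List.pyRange (hi + 1) n 1) (by
        intro x hx; rw [PySem.List.mem_pyRange_one] at hx
        unfold pvColor; rw [if_neg]; omega)]
    simp only [PySem.List.length_pyRange_one, List.append_assoc]
    congr 2
    · omega
    · congr 1; omega
    · congr 2
      · omega
      · congr 1; omega
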